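-- pv_equiv track=rewrite | github.com/NuryYanque/algorithm_analysis | DP/longestincreasesubsequence.py | ceilSearch
-- ===== SOURCE A (Python) =====
-- def ceilSearch(arr, low, high, x):
--
--     if x <= arr[low]:
--         return low
--
--     if x > arr[high]:
--         return -1
--
--     mid = (low + high)//2;  # low + (high - low)/2 */
--
--     if arr[mid] == x:
--         return mid
--
--     elif arr[mid] < x:
--         if mid + 1 <= high and x <= arr[mid+1]:
--             return mid + 1
--         else:
--             return ceilSearch(arr, mid+1, high, x)
--     else:
--         if mid - 1 >= low and x > arr[mid-1]:
--             return mid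
--         else:
--             return ceilSearch(arr, low, mid - 1, x)
-- ===== SOURCE B (Python) =====
-- def ceilSearch(arr, low, high, x):
--     # Lower-bound bisection: after the two boundary guards, shrink (lo, hi]
--     # to the first index whose value is >= x, instead of A's neighbor-checking
--     # three-way recursion.
--     if x <= arr[low]:
--         return low
--     if x > arr[high]:
--         return -1
--     lo, hi = low + 1, high
--     while lo < hi:
--         mid = (lo + hi) // 2
--         if arr[mid] < x:
--             lo = mid + 1
--         else:
--             hi = mid
--     return lo
-- ===== Notes on version B (the rewrite author's own statement) =====
-- stated objective: alternative
-- what changed: A's three-way recursion with mid+/-1 neighbor checks is replaced by a classic lower-bound bisection: after the two boundary guards, a two-branch while-loop shrinks (lo, hi] to the first index with arr[i] >= x, with no equality case and no neighbor lookups.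
-- outside the precondition, e.g. on ceilSearch([3, 9, 1, 5], 0, 3, 4): A returns 1, B returns 3; on ceilSearch([1, 2, 2, 2, 3], 0, 4, 2): A returns 2, B returns 1
import Mathlib
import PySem

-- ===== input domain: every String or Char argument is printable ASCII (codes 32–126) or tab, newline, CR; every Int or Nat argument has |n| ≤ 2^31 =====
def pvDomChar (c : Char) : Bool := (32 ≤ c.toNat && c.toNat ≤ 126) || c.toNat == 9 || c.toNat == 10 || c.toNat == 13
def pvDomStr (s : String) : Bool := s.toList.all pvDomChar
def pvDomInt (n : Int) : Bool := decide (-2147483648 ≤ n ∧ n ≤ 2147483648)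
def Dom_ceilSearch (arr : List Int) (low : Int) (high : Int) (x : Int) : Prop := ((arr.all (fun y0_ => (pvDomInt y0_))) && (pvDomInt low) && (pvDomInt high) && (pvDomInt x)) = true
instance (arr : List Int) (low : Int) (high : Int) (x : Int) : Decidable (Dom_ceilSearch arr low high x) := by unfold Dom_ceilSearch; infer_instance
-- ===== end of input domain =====

-- B replaces A's three-way neighbor-checking recursion by a classic two-branch
-- lower-bound bisection loop after the same two boundary guards; same cost, O(1) space.

-- ===== PORT A =====
-- Literal port of A's recursion; 'fuel' only makes the (in general non-terminating) Python
-- recursion total in Lean — whenever the Python recursion terminates the fuel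
-- (high-low).toNat + (low-high).toNat + 2 is never exhausted (the improper windows
-- it can be entered with shrink their |high-low| as well).
def ceilSearchAux (arr : List Int) (x : Int) : Int → Int → Nat → Int
  | _, _, 0 => 0
  | low, high, fuel + 1 =>
    match PySem.List.pyGet? arr low with
    | none => 0
    | some alow =>
      if x ≤ alow then low
      else
        match PySem.List.pyGet? arr high with
        | none => 0
        | some ahigh =>
          if x > ahigh then -1
          else
            let mid := PySem.Int.floordiv (low + high) 2
            match PySem.List.pyGet? arr mid with
            | none => 0
            | some amid =>
              if amid = x then mid
              else if amid < x then
                -- 'mid+1 <= high and x <= arr[mid+1]' with Python's short-circuit 'and'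
                if mid + 1 ≤ high then
                  match PySem.List.pyGet? arr (mid + 1) with
                  | none => 0
                  | some anext =>
                    if x ≤ anext then mid + 1
                    else ceilSearchAux arr x (mid + 1) high fuel
                else ceilSearchAux arr x (mid + 1) high fuel
              else
                if mid - 1 ≥ low then
                  match PySem.List.pyGet? arr (mid - 1) with
                  | none => 0
                  | some aprev =>
                    if x > aprev then mid
                    else ceilSearchAux arr x low (mid - 1) fuel
                else ceilSearchAux arr x low (mid - 1) fuel

def ceilSearch (arr : List Int) (low : Int) (high : Int) (x : Int) : Int :=
  ceilSearchAux arr x low high ((high - low).toNat + (low - high).toNat + 2)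

-- ===== PORT B =====
-- The while-loop 'lo, hi = low+1, high; while lo < hi: …' of Source B, as a tail
-- recursion on (lo, hi) with the same fuel discipline (never exhausted inside Pre_).
def lowerBoundLoop (arr : List Int) (x : Int) : Int → Int → Nat → Int
  | lo, _, 0 => lo
  | lo, hi, fuel + 1 =>
    if lo < hi then
      let mid := PySem.Int.floordiv (lo + hi) 2
      match PySem.List.pyGet? arr mid with
      | none => 0
      | some amid =>
        if amid < x then lowerBoundLoop arr x (mid + 1) hi fuel
        else lowerBoundLoop arr x lo mid fuel
    else lo

def ceilSearch_alt (arr : List Int) (low : Int) (high : Int) (x : Int) : Int :=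
  match PySem.List.pyGet? arr low with
  | none => 0
  | some alow =>
    if x ≤ alow then low
    else
      match PySem.List.pyGet? arr high with
      | none => 0
      | some ahigh =>
        if x > ahigh then -1
        else lowerBoundLoop arr x (low + 1) high ((high - low).toNat + 1)

-- ===== PRECONDITION & SPEC =====
-- Pre_ admits every input on which one of the two boundary guards fires (arr[low], arr[high]
-- readable, x ≤ arr[low] or x > arr[high]) and every proper window 0 ≤ low ≤ high < len(arr)
-- that honours binary search's contract: sorted on the window with at most one occurrence of x.
-- Excluded (A still returns there): windows passing both guards that are unsorted — no result is
-- specified for a binary search there — and sorted windows with duplicates of x, where A returns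
-- whichever duplicate the bisection first hits while B returns the first (a tie no one specifies).
def Pre_ceilSearch (arr : List Int) (low : Int) (high : Int) (x : Int) : Prop :=
  (PySem.List.pyGet? arr low).isSome ∧ (PySem.List.pyGet? arr high).isSome ∧
    (x ≤ (PySem.List.pyGet? arr low).getD 0 ∨ (PySem.List.pyGet? arr high).getD 0 < x ∨
      (0 ≤ low ∧ low ≤ high ∧ high < arr.length ∧
        List.Pairwise (· ≤ ·) ((arr.drop low.toNat).take (high.toNat + 1 - low.toNat)) ∧
        List.Pairwise (fun a b => ¬(a = x ∧ b = x))
          ((arr.drop low.toNat).take (high.toNat + 1 - low.toNat))))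
instance (arr : List Int) (low : Int) (high : Int) (x : Int) : Decidable (Pre_ceilSearch arr low high x) := by unfold Pre_ceilSearch; infer_instance

def pvWitness_ceilSearch : List Int × Int × Int × Int := ([1, 3, 5, 8], 0, 3, 4)

def Spec_ceilSearch (arr : List Int) (low : Int) (high : Int) (x : Int) (out : Int) : Prop := out = ceilSearch_alt arr low high x
instance (arr : List Int) (low : Int) (high : Int) (x : Int) (out : Int) : Decidable (Spec_ceilSearch arr low high x out) := by unfold Spec_ceilSearch; infer_instance

-- ===== CLAIM =====
def Claim_equal_ceilSearch : Prop := ∀ (arr : List Int) (low : Int) (high : Int) (x : Int), Dom_ceilSearch arr low high x → Pre_ceilSearch arr low high x → Spec_ceilSearch arr low high x (ceilSearch arr low high x)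

-- ===== LEMMAS AND PROOFS =====

-- reading a list at a nonnegative in-range Int index
theorem pyGetI (arr : List Int) (i : Int) (h0 : 0 ≤ i) (h1 : i < arr.length) :
    PySem.List.pyGet? arr i = some (arr.getD i.toNat 0) := by
  rw [PySem.List.pyGet?_of_nonneg arr h0]
  have ht : i.toNat < arr.length := by omega
  simp [List.getD_eq_getElem?_getD, List.getElem?_eq_getElem ht]

-- midpoint bounds for floordiv (lo+hi) 2
theorem mid_bounds (lo hi : Int) (h : lo < hi) :
    lo ≤ PySem.Int.floordiv (lo + hi) 2 ∧ PySem.Int.floordiv (lo + hi) 2 < hi := by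
  constructor
  · exact (PySem.Int.floordiv_two_mid_bounds (le_of_lt h)).1
  · rw [PySem.Int.floordiv_lt_iff_lt_mul (by omega : (0:Int) < 2)]; omega

-- A's recursion, inside an invariant window arr[lo] < x ≤ arr[hi] of a sorted,
-- x-unique slice, returns the crossing index r: low < r ≤ high, arr[r-1] < x ≤ arr[r].
theorem ceilAux_crossing (arr : List Int) (x low high : Int)
    (h0 : 0 ≤ low) (hhl : (high : Int) < arr.length)
    (hsort : ∀ a b : Int, low ≤ a → a < b → b ≤ high → arr.getD a.toNat 0 ≤ arr.getD b.toNat 0)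
    (huniq : ∀ a b : Int, low ≤ a → a ≤ high → low ≤ b → b ≤ high →
      arr.getD a.toNat 0 = x → arr.getD b.toNat 0 = x → a = b) :
    ∀ (fuel : Nat) (lo hi : Int), low ≤ lo → lo ≤ hi → hi ≤ high →
      arr.getD lo.toNat 0 < x → x ≤ arr.getD hi.toNat 0 → (hi - lo).toNat < fuel →
      low < ceilSearchAux arr x lo hi fuel ∧ ceilSearchAux arr x lo hi fuel ≤ high ∧
        arr.getD (ceilSearchAux arr x lo hi fuel - 1).toNat 0 < x ∧
        x ≤ arr.getD (ceilSearchAux arr x lo hi fuel).toNat 0 := by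
  intro fuel
  induction fuel with
  | zero => intro lo hi _ _ _ _ _ hf; omega
  | succ n ih =>
    intro lo hi hllo hlh hhih hvlo hvhi hf
    have hlo0 : 0 ≤ lo := by omega
    have hlth : lo < hi := by
      rcases lt_or_eq_of_le hlh with h | h
      · exact h
      · subst h; omega
    have hmb := mid_bounds lo hi hlth
    set mid := PySem.Int.floordiv (lo + hi) 2 with hmiddef
    have hglo := pyGetI arr lo hlo0 (by omega)
    have hghi := pyGetI arr hi (by omega) (by omega)
    have hgmid := pyGetI arr mid (by omega) (by omega)
    rw [ceilSearchAux, hglo]; dsimp only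
    rw [if_neg (by omega : ¬ x ≤ arr.getD lo.toNat 0)]
    rw [hghi]; dsimp only
    rw [if_neg (by omega : ¬ x > arr.getD hi.toNat 0)]
    rw [← hmiddef, hgmid]; dsimp only
    by_cases heq : arr.getD mid.toNat 0 = x
    · rw [if_pos heq]
      -- mid ≠ lo since arr[lo] < x = arr[mid]
      have hne : mid ≠ lo := by intro h; rw [h] at heq; omega
      have hmlo : lo < mid := by omega
      refine ⟨by omega, by omega, ?_, by omega⟩
      -- arr[mid-1] ≤ arr[mid] = x and ≠ x by uniqueness
      have hle : arr.getD (mid - 1).toNat 0 ≤ arr.getD mid.toNat 0 :=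
        hsort (mid - 1) mid (by omega) (by omega) (by omega)
      rcases lt_or_eq_of_le hle with h | h
      · omega
      · exfalso
        have := huniq (mid - 1) mid (by omega) (by omega) (by omega) (by omega)
          (by omega) heq
        omega
    · rw [if_neg heq]
      by_cases hlt : arr.getD mid.toNat 0 < x
      · rw [if_pos hlt]
        rw [if_pos (by omega : mid + 1 ≤ hi)]
        have hgnext := pyGetI arr (mid + 1) (by omega) (by omega)
        rw [hgnext]; dsimp only
        by_cases hnx : x ≤ arr.getD (mid + 1).toNat 0
        · rw [if_pos hnx]
          refine ⟨by omega, by omega, ?_, hnx⟩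
          simp only [add_sub_cancel_right]; exact hlt
        · rw [if_neg hnx]
          exact ih (mid + 1) hi (by omega) (by omega) hhih
            (by simpa using (by omega : arr.getD (mid + 1).toNat 0 < x)) hvhi (by omega)
      · rw [if_neg hlt]
        -- arr[mid] > x; mid ≠ lo since arr[lo] < x < arr[mid]
        have hne : mid ≠ lo := by intro h; rw [h] at hlt; omega
        rw [if_pos (by omega : mid - 1 ≥ lo)]
        have hgprev := pyGetI arr (mid - 1) (by omega) (by omega)
        rw [hgprev]; dsimp only
        by_cases hpx : x > arr.getD (mid - 1).toNat 0
        · rw [if_pos hpx]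
          exact ⟨by omega, by omega, hpx, by omega⟩
        · rw [if_neg hpx]
          exact ih lo (mid - 1) hllo (by omega) (by omega) hvlo (by omega) (by omega)

-- B's lower-bound loop, inside an invariant window arr[lo-1] < x ≤ arr[hi],
-- returns the crossing index; needs no sortedness.
theorem lowerBound_crossing (arr : List Int) (x low high : Int)
    (h0 : 0 ≤ low) (hhl : (high : Int) < arr.length) :
    ∀ (fuel : Nat) (lo hi : Int), low < lo → lo ≤ hi → hi ≤ high →
      arr.getD (lo - 1).toNat 0 < x → x ≤ arr.getD hi.toNat 0 → (hi - lo).toNat < fuel →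
      low < lowerBoundLoop arr x lo hi fuel ∧ lowerBoundLoop arr x lo hi fuel ≤ high ∧
        arr.getD (lowerBoundLoop arr x lo hi fuel - 1).toNat 0 < x ∧
        x ≤ arr.getD (lowerBoundLoop arr x lo hi fuel).toNat 0 := by
  intro fuel
  induction fuel with
  | zero => intro lo hi _ _ _ _ _ hf; omega
  | succ n ih =>
    intro lo hi hllo hlh hhih hvlo hvhi hf
    by_cases hlth : lo < hi
    · have hmb := mid_bounds lo hi hlth
      set mid := PySem.Int.floordiv (lo + hi) 2 with hmiddef
      have hgmid := pyGetI arr mid (by omega) (by omega)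
      simp only [lowerBoundLoop, if_pos hlth, ← hmiddef, hgmid]
      by_cases hlt : arr.getD mid.toNat 0 < x
      · rw [if_pos hlt]
        exact ih (mid + 1) hi (by omega) (by omega) hhih
          (by simpa using hlt) hvhi (by omega)
      · rw [if_neg hlt]
        exact ih lo mid hllo (by omega) (by omega) hvlo (by omega) (by omega)
    · simp only [lowerBoundLoop, if_neg hlth]
      have : lo = hi := by omega
      subst this
      exact ⟨hllo, by omega, hvlo, hvhi⟩

-- reading the sorted/unique slice of the window at an offset
theorem slice_get (arr : List Int) (low high : Int) (k : Nat)
    (hlen : k < ((arr.drop low.toNat).take (high.toNat + 1 - low.toNat)).length) :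
    ((arr.drop low.toNat).take (high.toNat + 1 - low.toNat))[k]'hlen
      = arr.getD (low.toNat + k) 0 := by
  have hlt : low.toNat + k < arr.length := by
    simp [List.length_take, List.length_drop] at hlen; omega
  simp [List.getElem_take, List.getElem_drop, List.getD_eq_getElem?_getD,
    List.getElem?_eq_getElem hlt]

theorem window_sort (arr : List Int) (low high : Int) (h0 : 0 ≤ low)
    (hhl : (high : Int) < arr.length)
    (hp : List.Pairwise (· ≤ ·) ((arr.drop low.toNat).take (high.toNat + 1 - low.toNat))) :
    ∀ a b : Int, low ≤ a → a < b → b ≤ high →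
      arr.getD a.toNat 0 ≤ arr.getD b.toNat 0 := by
  intro a b ha hab hb
  have hlen : ((arr.drop low.toNat).take (high.toNat + 1 - low.toNat)).length
      = min (high.toNat + 1 - low.toNat) (arr.length - low.toNat) := by
    simp [List.length_take, List.length_drop]
  have hi : a.toNat - low.toNat < ((arr.drop low.toNat).take (high.toNat + 1 - low.toNat)).length := by omega
  have hj : b.toNat - low.toNat < ((arr.drop low.toNat).take (high.toNat + 1 - low.toNat)).length := by omega
  have := (List.pairwise_iff_getElem.mp hp) (a.toNat - low.toNat) (b.toNat - low.toNat) hi hj (by omega)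
  rw [slice_get arr low high _ hi, slice_get arr low high _ hj] at this
  have ea : low.toNat + (a.toNat - low.toNat) = a.toNat := by omega
  have eb : low.toNat + (b.toNat - low.toNat) = b.toNat := by omega
  rw [ea, eb] at this
  exact this

theorem window_uniq (arr : List Int) (low high x : Int) (h0 : 0 ≤ low)
    (hhl : (high : Int) < arr.length)
    (hp : List.Pairwise (fun a b => ¬(a = x ∧ b = x))
      ((arr.drop low.toNat).take (high.toNat + 1 - low.toNat))) :
    ∀ a b : Int, low ≤ a → a ≤ high → low ≤ b → b ≤ high →
      arr.getD a.toNat 0 = x → arr.getD b.toNat 0 = x → a = b := by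
  have key : ∀ a b : Int, low ≤ a → a < b → b ≤ high →
      arr.getD a.toNat 0 = x → arr.getD b.toNat 0 = x → False := by
    intro a b ha hab hb hva hvb
    have hlen : ((arr.drop low.toNat).take (high.toNat + 1 - low.toNat)).length
        = min (high.toNat + 1 - low.toNat) (arr.length - low.toNat) := by
      simp [List.length_take, List.length_drop]
    have hi : a.toNat - low.toNat < ((arr.drop low.toNat).take (high.toNat + 1 - low.toNat)).length := by omega
    have hj : b.toNat - low.toNat < ((arr.drop low.toNat).take (high.toNat + 1 - low.toNat)).length := by omega
    have hpw := (List.pairwise_iff_getElem.mp hp) (a.toNat - low.toNat) (b.toNat - low.toNat) hi hj (by omega)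
    rw [slice_get arr low high _ hi, slice_get arr low high _ hj] at hpw
    have ea : low.toNat + (a.toNat - low.toNat) = a.toNat := by omega
    have eb : low.toNat + (b.toNat - low.toNat) = b.toNat := by omega
    rw [ea, eb] at hpw
    exact hpw ⟨hva, hvb⟩
  intro a b ha ha' hb hb' hva hvb
  rcases lt_trichotomy a b with h | h | h
  · exact absurd (key a b ha h hb' hva hvb) (by simp)
  · exact h
  · exact absurd (key b a hb h ha' hvb hva) (by simp)

-- on a sorted window the crossing index is unique
theorem crossing_unique (arr : List Int) (x low high : Int)
    (hsort : ∀ a b : Int, low ≤ a → a < b → b ≤ high → arr.getD a.toNat 0 ≤ arr.getD b.toNat 0)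
    (r1 r2 : Int)
    (c1 : low < r1 ∧ r1 ≤ high ∧ arr.getD (r1 - 1).toNat 0 < x ∧ x ≤ arr.getD r1.toNat 0)
    (c2 : low < r2 ∧ r2 ≤ high ∧ arr.getD (r2 - 1).toNat 0 < x ∧ x ≤ arr.getD r2.toNat 0) :
    r1 = r2 := by
  obtain ⟨h1l, h1h, h1p, h1v⟩ := c1
  obtain ⟨h2l, h2h, h2p, h2v⟩ := c2
  by_contra hne
  rcases lt_or_gt_of_ne hne with h | h
  · -- r1 < r2: x ≤ arr[r1] ≤ arr[r2-1] < x
    by_cases he : r1 = r2 - 1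
    · rw [he] at h1v; omega
    · have := hsort r1 (r2 - 1) (by omega) (by omega) (by omega); omega
  · by_cases he : r2 = r1 - 1
    · rw [he] at h2v; omega
    · have := hsort r2 (r1 - 1) (by omega) (by omega) (by omega); omega

-- ===== VERDICT =====
theorem ceilSearch_spec : Claim_equal_ceilSearch := by
  intro arr low high x _ hpre
  obtain ⟨hsl, hsh, hdisj⟩ := hpre
  obtain ⟨alow, hglow⟩ := Option.isSome_iff_exists.mp hsl
  obtain ⟨ahigh, hghigh⟩ := Option.isSome_iff_exists.mp hsh
  rw [hglow, hghigh] at hdisj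
  simp only [Option.getD_some] at hdisj
  unfold Spec_ceilSearch ceilSearch ceilSearch_alt
  rw [ceilSearchAux, hglow, hghigh]; dsimp only
  by_cases h1 : x ≤ alow
  · rw [if_pos h1, if_pos h1]
  · rw [if_neg h1, if_neg h1]
    by_cases h2 : x > ahigh
    · rw [if_pos h2, if_pos h2]
    · rw [if_neg h2, if_neg h2]
      have hwin : 0 ≤ low ∧ low ≤ high ∧ (high : Int) < arr.length ∧
          List.Pairwise (· ≤ ·) ((arr.drop low.toNat).take (high.toNat + 1 - low.toNat)) ∧
          List.Pairwise (fun a b => ¬(a = x ∧ b = x))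
            ((arr.drop low.toNat).take (high.toNat + 1 - low.toNat)) := by
        rcases hdisj with h | h | h
        · exact absurd h h1
        · exact absurd h (by omega)
        · exact h
      obtain ⟨h0, hlh, hhl, hpairS, hpairU⟩ := hwin
      have hsort := window_sort arr low high h0 hhl hpairS
      have huniq := window_uniq arr low high x h0 hhl hpairU
      -- guard values at the window ends
      have hglow' : alow = arr.getD low.toNat 0 := by
        have := pyGetI arr low h0 (by omega); rw [hglow] at this; exact (Option.some.inj this)
      have hghigh' : ahigh = arr.getD high.toNat 0 := by
        have := pyGetI arr high (by omega) hhl; rw [hghigh] at this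
        exact (Option.some.inj this)
      have hlthigh : low < high := by
        rcases lt_or_eq_of_le hlh with h | h
        · exact h
        · exfalso; rw [h] at hglow; rw [hglow] at hghigh
          have : alow = ahigh := Option.some.inj hghigh
          omega
      -- both sides compute the unique crossing index of the window
      have cA := ceilAux_crossing arr x low high h0 hhl hsort huniq
        ((high - low).toNat + (low - high).toNat + 2) low high (le_refl low) hlh (le_refl high)
        (by omega) (by omega) (by omega)
      have cB := lowerBound_crossing arr x low high h0 hhl
        ((high - low).toNat + 1) (low + 1) high (by omega) (by omega) (le_refl high)
        (by simpa using (by omega : arr.getD low.toNat 0 < x)) (by omega) (by omega)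
      have heq : ceilSearchAux arr x low high ((high - low).toNat + (low - high).toNat + 2) =
          lowerBoundLoop arr x (low + 1) high ((high - low).toNat + 1) :=
        crossing_unique arr x low high hsort _ _ cA cB
      rw [ceilSearchAux, hglow, hghigh] at heq
      dsimp only at heq
      rw [if_neg h1, if_neg h2] at heq
      exact heq
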